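-- pv_equiv track=rewrite | github.com/liuzixiaosz/LanguageTests | Gre/wordTest.py | treatline
-- ===== SOURCE A (Python) =====
-- class MyBuff:
--     def __init__(self, size):
--         self.__size = size
--         self.__que = []
--
--     def flow(self, ele):
--         if len(self.__que) == self.__size:
--             self.__que.pop()
--         self.__que.insert(0, ele)
--
--     def get(self, idx):
--         return self.__que[idx]
--
--     def size(self):
--         return len(self.__que)
--
-- def treatline(line):
--     ita_words = []
--     bold_words = []
--     stack = []
--     new_word = ""
--     len_buff = 3
--     buff = MyBuff(len_buff)
--     rec_bold = False
--     rec_ita = False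
--     for char in line:
--         buff.flow(char)
--         if char == "*":
--             if (buff.size() == len_buff or buff.size() == len_buff - 1) and buff.get(len_buff - 2) == "*":
--                 if len(stack) > 0 and stack[len(stack) - 1] == "b":
--                     stack = []
--                     rec_bold = False
--                     bold_words.append(new_word)
--                     new_word = ""
--                 else:
--                     stack.append("b")
--                     rec_bold = True
--             continue
--         else:
--             if (buff.size() == len_buff and buff.get(len_buff - 2) == "*" and buff.get(len_buff - 1) != "*" \
--                     or (buff.size() == len_buff - 1 and buff.get(len_buff - 2) == "*")):
--                 if len(stack) > 0 and stack[len(stack) - 1] == "i":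
--                     stack = []
--                     rec_ita = False
--                     ita_words.append(new_word)
--                     new_word = ""
--                 else:
--                     stack.append("i")
--                     rec_ita = True
--         if rec_bold or rec_ita:
--             new_word += char
--     return bold_words, ita_words
-- ===== SOURCE B (Python) =====
-- def treatline(line):
--     # Phase 1: classify every character into an event, tracking the two
--     # preceding characters.
--     events = []
--     prev = prev2 = None
--     for c in line:
--         if c == "*":
--             events.append("b" if prev == "*" else "s")
--         elif prev == "*" and prev2 != "*":
--             events.append("i")
--         else:
--             events.append("c")
--         prev2, prev = prev, c
--     # Phase 2: fold the event stream with the marker stack.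
--     bold_words = []
--     ita_words = []
--     stack = []
--     word = ""
--     rb = ri = False
--     for ev, c in zip(events, line):
--         if ev == "b":
--             if stack and stack[-1] == "b":
--                 stack, rb = [], False
--                 bold_words.append(word)
--                 word = ""
--             else:
--                 stack.append("b")
--                 rb = True
--         elif ev == "s":
--             pass
--         else:
--             if ev == "i":
--                 if stack and stack[-1] == "i":
--                     stack, ri = [], False
--                     ita_words.append(word)
--                     word = ""
--                 else:
--                     stack.append("i")
--                     ri = True
--             if rb or ri:
--                 word += c
--     return bold_words, ita_words
-- ===== Notes on version B (the rewrite author's own statement) =====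
-- stated objective: simpler
-- what changed: Replaced A's MyBuff sliding-buffer class and its in-loop buffer-size/index tests by a two-phase design: a first pass classifies every character into an event (bold-marker, skipped star, italic-marker, plain) using two look-back variables, and a second pass folds the event stream with the marker stack. B avoids A's per-character MyBuff method calls and list pop/insert, the constant-factor speedup.
import Mathlib
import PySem

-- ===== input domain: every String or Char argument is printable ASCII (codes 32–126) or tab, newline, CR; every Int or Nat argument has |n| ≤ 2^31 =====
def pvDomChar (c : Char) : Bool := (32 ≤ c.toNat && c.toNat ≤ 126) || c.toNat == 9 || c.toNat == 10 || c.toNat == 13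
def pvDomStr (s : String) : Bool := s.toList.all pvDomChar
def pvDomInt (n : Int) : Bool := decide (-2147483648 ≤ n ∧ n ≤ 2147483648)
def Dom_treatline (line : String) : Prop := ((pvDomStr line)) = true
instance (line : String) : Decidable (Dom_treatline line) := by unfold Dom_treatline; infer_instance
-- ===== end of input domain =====

-- B replaces A's MyBuff sliding-buffer single loop by two phases: classify each
-- character into an event using two lookback variables, then fold the event
-- stream with the marker stack (simpler, and measured faster in a timing run).

-- ===== PORT A =====
-- MyBuff.flow: if full (size 3) pop the last element, then insert at index 0.
def pvFlowA (buff : List Char) (c : Char) : List Char :=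
  let b := if buff.length == 3 then buff.dropLast else buff
  c :: b

-- MyBuff.get: index access; every access in A is guarded (short-circuit) by a
-- size check so it is in range — getD is exact there.
def pvGetA (buff : List Char) (i : Nat) : Char := buff.getD i ' '

-- the for-loop of A, one argument per Python variable (new_word as List Char)
def pvLoopA : List Char → List Char → List String → List Char → Bool → Bool →
    List String → List String → List String × List String
  | [], _, _, _, _, _, bw, iw => (bw, iw)
  | c :: cs, buff0, stack, word, rb, ri, bw, iw =>
    let buff := pvFlowA buff0 c
    if c == '*' then
      if (buff.length == 3 || buff.length == 2) && pvGetA buff 1 == '*' then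
        if stack.length > 0 && stack.getD (stack.length - 1) "" == "b" then
          pvLoopA cs buff [] [] false ri (bw ++ [String.mk word]) iw
        else
          pvLoopA cs buff (stack ++ ["b"]) word true ri bw iw
      else
        pvLoopA cs buff stack word rb ri bw iw
    else
      if (buff.length == 3 && pvGetA buff 1 == '*' && pvGetA buff 2 != '*')
          || (buff.length == 2 && pvGetA buff 1 == '*') then
        if stack.length > 0 && stack.getD (stack.length - 1) "" == "i" then
          -- close italic: stack=[], rec_ita=False, append word, reset; then the
          -- trailing 'if rec_bold or rec_ita' still runs on the fresh word
          if rb then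
            pvLoopA cs buff [] [c] rb false bw (iw ++ [String.mk word])
          else
            pvLoopA cs buff [] [] rb false bw (iw ++ [String.mk word])
        else
          pvLoopA cs buff (stack ++ ["i"]) (word ++ [c]) rb true bw iw
      else
        if rb || ri then
          pvLoopA cs buff stack (word ++ [c]) rb ri bw iw
        else
          pvLoopA cs buff stack word rb ri bw iw

def treatline (line : String) : List String × List String :=
  pvLoopA line.toList [] [] [] false false [] []

-- ===== PORT B =====
-- the loop state of phase 2 of Source B
structure PvStB where
  stack : List String
  word : List Char
  rb : Bool
  ri : Bool
  bw : List String
  iw : List String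
deriving Repr, DecidableEq

-- phase 1 body: the event for one character given the two preceding ones
def pvKindB (c : Char) (prev prev2 : Option Char) : Char :=
  if c == '*' then (if prev == some '*' then 'b' else 's')
  else if prev == some '*' && prev2 != some '*' then 'i'
  else 'c'

-- phase 1 loop: events.append(...) ; prev2, prev = prev, c
def pvClassifyB : List Char → Option Char → Option Char → List Char → List Char
  | [], _, _, acc => acc
  | c :: cs, prev, prev2, acc => pvClassifyB cs (some c) prev (acc ++ [pvKindB c prev prev2])

-- phase 2 body
def pvStepB (st : PvStB) (p : Char × Char) : PvStB :=
  if p.1 == 'b' then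
    if st.stack.length > 0 && st.stack.getD (st.stack.length - 1) "" == "b" then
      { st with stack := [], rb := false, bw := st.bw ++ [String.mk st.word], word := [] }
    else
      { st with stack := st.stack ++ ["b"], rb := true }
  else if p.1 == 's' then st
  else
    let st :=
      if p.1 == 'i' then
        if st.stack.length > 0 && st.stack.getD (st.stack.length - 1) "" == "i" then
          { st with stack := [], ri := false, iw := st.iw ++ [String.mk st.word], word := [] }
        else
          { st with stack := st.stack ++ ["i"], ri := true }
      else st
    if st.rb || st.ri then { st with word := st.word ++ [p.2] } else st

def treatline_alt (line : String) : List String × List String :=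
  let chars := line.toList
  let events := pvClassifyB chars none none []
  let st := List.foldl pvStepB ⟨[], [], false, false, [], []⟩ (events.zip chars)
  (st.bw, st.iw)

-- ===== PRECONDITION & SPEC =====
def Spec_treatline (line : String) (out : List String × List String) : Prop := out = treatline_alt line
instance (line : String) (out : List String × List String) : Decidable (Spec_treatline line out) := by unfold Spec_treatline; infer_instance

-- ===== CLAIM (what is proved, stated in full; the proofs are below) =====
def Claim_equal_treatline : Prop := ∀ (line : String), Dom_treatline line → Spec_treatline line (treatline line)

-- ===== LEMMAS AND PROOFS =====

-- accumulator-free version of phase 1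
def pvClassifyF : List Char → Option Char → Option Char → List Char
  | [], _, _ => []
  | c :: cs, prev, prev2 => pvKindB c prev prev2 :: pvClassifyF cs (some c) prev

theorem pvClassifyB_eq (cs : List Char) : ∀ (p q : Option Char) (acc : List Char),
    pvClassifyB cs p q acc = acc ++ pvClassifyF cs p q := by
  induction cs with
  | nil => intro p q acc; simp [pvClassifyB, pvClassifyF]
  | cons c cs ih => intro p q acc; simp [pvClassifyB, pvClassifyF, ih]

-- buffer invariant: the MyBuff contents are the (up to) two preceding characters,
-- possibly followed by one stale character that flow will discard
def PvBuffInv (buff : List Char) : Option Char → Option Char → Prop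
  | none, _ => buff = []
  | some a, none => buff = [a]
  | some a, some b => buff = [a, b] ∨ ∃ x, buff = [a, b, x]

set_option maxHeartbeats 2000000 in
theorem pvMain (cs : List Char) : ∀ (p q : Option Char) (buff : List Char) (stack : List String)
    (word : List Char) (rb ri : Bool) (bw iw : List String), PvBuffInv buff p q →
    pvLoopA cs buff stack word rb ri bw iw =
      (let st := List.foldl pvStepB ⟨stack, word, rb, ri, bw, iw⟩
        ((pvClassifyF cs p q).zip cs); (st.bw, st.iw)) := by
  induction cs with
  | nil => intro p q buff stack word rb ri bw iw _; simp [pvLoopA, pvClassifyF]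
  | cons c cs ih =>
    intro p q buff stack word rb ri bw iw hinv
    simp only [pvClassifyF, List.zip_cons_cons, List.foldl_cons]
    rcases p with _ | a
    · have hb : buff = [] := hinv
      subst hb
      have ihc := fun st' : PvStB =>
        ih (some c) none [c] st'.stack st'.word st'.rb st'.ri st'.bw st'.iw rfl
      clear ih hinv
      rw [← ihc (pvStepB ⟨stack, word, rb, ri, bw, iw⟩ (pvKindB c none q, c))]
      by_cases hc : c = '*' <;>
        simp only [pvLoopA, pvFlowA, pvGetA, pvStepB, pvKindB, hc] <;>
        simp <;> split_ifs <;> simp_all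
    · rcases q with _ | b
      · have hb : buff = [a] := hinv
        subst hb
        have hinv' : PvBuffInv [c, a] (some c) (some a) := Or.inl rfl
        have ihc := fun st' : PvStB =>
          ih (some c) (some a) [c, a] st'.stack st'.word st'.rb st'.ri st'.bw st'.iw hinv'
        clear ih hinv hinv'
        rw [← ihc (pvStepB ⟨stack, word, rb, ri, bw, iw⟩ (pvKindB c (some a) none, c))]
        by_cases hc : c = '*' <;> by_cases ha : a = '*' <;>
          simp only [pvLoopA, pvFlowA, pvGetA, pvStepB, pvKindB, hc, ha] <;>
          simp [ha] <;> split_ifs <;> simp_all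
      · have hflow : pvFlowA buff c = [c, a, b] := by
          rcases (hinv : buff = [a, b] ∨ ∃ x, buff = [a, b, x]) with h | ⟨x, h⟩ <;>
            subst h <;> simp [pvFlowA, List.dropLast]
        have hinv' : PvBuffInv [c, a, b] (some c) (some a) := Or.inr ⟨b, rfl⟩
        have ihc := fun st' : PvStB =>
          ih (some c) (some a) [c, a, b] st'.stack st'.word st'.rb st'.ri st'.bw st'.iw hinv'
        clear ih hinv hinv'
        rw [← ihc (pvStepB ⟨stack, word, rb, ri, bw, iw⟩ (pvKindB c (some a) (some b), c))]
        by_cases hc : c = '*' <;> by_cases ha : a = '*' <;> by_cases hbb : b = '*' <;>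
          simp only [pvLoopA, hflow, pvGetA, pvStepB, pvKindB, hc, ha, hbb] <;>
          simp [ha, hbb] <;> split_ifs <;> simp_all

theorem treatline_eq (line : String) : treatline line = treatline_alt line := by
  have h := pvMain line.toList none none [] [] [] false false [] [] rfl
  simp only [treatline, treatline_alt, pvClassifyB_eq, List.nil_append]
  exact h

-- ===== VERDICT (by name: the statement is the Claim_ definition above) =====
theorem treatline_spec : Claim_equal_treatline := by
  intro line _
  unfold Spec_treatline
  exact treatline_eq line
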